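-- pv_equiv track=rewrite | github.com/JnyJny/coin_bite | coins_str.py | coins_on_the_table
-- ===== SOURCE A (Python) =====
-- Penny = "p"
--
-- Nickel = "n"
--
-- Dime = "d"
--
-- Quarter = "q"
--
-- def coins_on_the_table(n_pennies: int = 1001) -> list:
--
--     substitutions = {1: Penny, 2: Nickel, 3: Dime, 4: Quarter}
--     coins = []
--     for n in range(0, n_pennies):
--         for pos, coin in substitutions.items():
--             if (n + 1) % pos == 0:
--                 c = coin
--         coins.append(c)
--     return coins
-- ===== SOURCE B (Python) =====
-- # Table-driven: the label depends only on position value mod 12 (lcm of 1,2,3,4),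
-- # so precompute one 12-entry period and tile it.
-- PATTERN = ["p", "n", "d", "q", "p", "d", "p", "q", "d", "n", "p", "q"]
--
-- def coins_on_the_table(n_pennies: int = 1001) -> list:
--     return [PATTERN[n % 12] for n in range(n_pennies)]
-- ===== Notes on version B (the rewrite author's own statement) =====
-- stated objective: faster
-- what changed: Replaces the per-element scan over the divisor dict by a precomputed 12-entry period table (labels are periodic with period lcm(1,2,3,4)=12) indexed with n % 12.
import Mathlib
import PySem

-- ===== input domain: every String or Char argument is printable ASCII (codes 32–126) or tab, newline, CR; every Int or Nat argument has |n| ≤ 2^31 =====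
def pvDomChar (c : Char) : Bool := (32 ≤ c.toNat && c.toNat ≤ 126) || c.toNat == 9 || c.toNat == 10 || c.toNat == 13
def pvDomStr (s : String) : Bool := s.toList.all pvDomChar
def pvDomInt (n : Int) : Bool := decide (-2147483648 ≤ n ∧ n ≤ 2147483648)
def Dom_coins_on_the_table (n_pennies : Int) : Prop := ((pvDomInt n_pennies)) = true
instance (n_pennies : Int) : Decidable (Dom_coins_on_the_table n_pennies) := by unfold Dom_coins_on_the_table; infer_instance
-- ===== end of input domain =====

-- B replaces A's per-element scan of the divisor dict by indexing a precomputed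
-- 12-entry period table (labels are periodic with period lcm(1,2,3,4) = 12).

-- ===== PORT A =====
def coins_on_the_table (n_pennies : Int) : List String :=
  let substitutions : List (Int × String) := [(1, "p"), (2, "n"), (3, "d"), (4, "q")]
  -- loop state: (coins, c); Python's `c` is unset before the first inner pass but
  -- is always assigned at pos = 1, so the "" initial value is never observable
  let r := (PySem.List.pyRange 0 n_pennies 1).foldl
    (fun (st : List String × String) n =>
      let c := substitutions.foldl
        (fun c pc => if PySem.Int.mod (n + 1) pc.1 == 0 then pc.2 else c) st.2
      (st.1 ++ [c], c)) ([], "")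
  r.1

-- ===== PORT B =====
def pvPattern : List String := ["p", "n", "d", "q", "p", "d", "p", "q", "d", "n", "p", "q"]

def coins_on_the_table_alt (n_pennies : Int) : List String :=
  -- PATTERN[n % 12]: the index is always in range, so the default is never used
  (PySem.List.pyRange 0 n_pennies 1).map
    (fun n => PySem.List.pyGetD pvPattern (PySem.Int.mod n 12) "")

-- ===== PRECONDITION & SPEC =====
def Spec_coins_on_the_table (n_pennies : Int) (out : List String) : Prop := out = coins_on_the_table_alt n_pennies
instance (n_pennies : Int) (out : List String) : Decidable (Spec_coins_on_the_table n_pennies out) := by unfold Spec_coins_on_the_table; infer_instance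

-- ===== CLAIM (what is proved, stated in full; the proofs are below) =====
def Claim_equal_coins_on_the_table : Prop := ∀ (n_pennies : Int), Dom_coins_on_the_table n_pennies → Spec_coins_on_the_table n_pennies (coins_on_the_table n_pennies)

-- ===== LEMMAS AND PROOFS =====

-- A's inner scan, as a function of the position n and the carried c
def pvLab (n : Int) (c : String) : String :=
  ([(1, "p"), (2, "n"), (3, "d"), (4, "q")] : List (Int × String)).foldl
    (fun c pc => if PySem.Int.mod (n + 1) pc.1 == 0 then pc.2 else c) c

-- the carried c is dead: pos = 1 always matches
theorem pvLab_const (n : Int) (c : String) : pvLab n c = pvLab n "" := by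
  simp [pvLab, List.foldl, PySem.Int.mod]

-- pointwise: A's scan equals B's table lookup
theorem pvLab_eq (n : Int) :
    pvLab n "" = PySem.List.pyGetD pvPattern (PySem.Int.mod n 12) "" := by
  have h1 : PySem.Int.mod (n + 1) 1 = (n + 1) % 1 := PySem.Int.mod_eq_emod_of_pos (by omega)
  have h2 : PySem.Int.mod (n + 1) 2 = (n + 1) % 2 := PySem.Int.mod_eq_emod_of_pos (by omega)
  have h3 : PySem.Int.mod (n + 1) 3 = (n + 1) % 3 := PySem.Int.mod_eq_emod_of_pos (by omega)
  have h4 : PySem.Int.mod (n + 1) 4 = (n + 1) % 4 := PySem.Int.mod_eq_emod_of_pos (by omega)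
  have h12 : PySem.Int.mod n 12 = n % 12 := PySem.Int.mod_eq_emod_of_pos (by omega)
  have e1 : (n + 1) % 1 = (n % 12 + 1) % 1 := by omega
  have e2 : (n + 1) % 2 = (n % 12 + 1) % 2 := by omega
  have e3 : (n + 1) % 3 = (n % 12 + 1) % 3 := by omega
  have e4 : (n + 1) % 4 = (n % 12 + 1) % 4 := by omega
  have hlo : 0 ≤ n % 12 := Int.emod_nonneg _ (by norm_num)
  have hhi : n % 12 < 12 := Int.emod_lt_of_pos _ (by norm_num)
  simp only [pvLab, List.foldl, h1, h2, h3, h4, h12, e1, e2, e3, e4]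
  generalize n % 12 = r at hlo hhi ⊢
  interval_cases r <;> decide

-- the loop accumulates exactly the map of pvLab
theorem pvLoop (l : List Int) (acc : List String) (c : String) :
    (l.foldl
      (fun (st : List String × String) n =>
        let c := pvLab n st.2
        (st.1 ++ [c], c)) (acc, c)).1
      = acc ++ l.map (fun n => PySem.List.pyGetD pvPattern (PySem.Int.mod n 12) "") := by
  induction l generalizing acc c with
  | nil => simp
  | cons x xs ih =>
      simp only [List.foldl, List.map]
      rw [ih, pvLab_const, pvLab_eq]
      simp

-- ===== VERDICT (by name: the statement is the Claim_ definition above) =====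
theorem coins_on_the_table_spec : Claim_equal_coins_on_the_table := by
  intro n _
  show coins_on_the_table n = coins_on_the_table_alt n
  unfold coins_on_the_table coins_on_the_table_alt
  exact pvLoop (PySem.List.pyRange 0 n 1) [] ""
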